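-- pv_equiv track=rewrite | github.com/kayehMDA/CVM-colorBot | src/utils/mouse/ArduinoAPI.py | _iter_segmented_moves
-- ===== SOURCE A (Python) =====
-- def _split_axis(delta: int):
--     remaining = int(delta)
--     chunks = []
--
--     while remaining > 127:
--         chunks.append(127)
--         remaining -= 127
--
--     while remaining < -127:
--         chunks.append(-127)
--         remaining += 127
--
--     chunks.append(remaining)
--     return chunks
--
-- def _iter_segmented_moves(dx: int, dy: int):
--     x_chunks = _split_axis(dx)
--     y_chunks = _split_axis(dy)
--     chunk_count = max(len(x_chunks), len(y_chunks))
--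
--     for i in range(chunk_count):
--         yield (
--             x_chunks[i] if i < len(x_chunks) else 0,
--             y_chunks[i] if i < len(y_chunks) else 0,
--         )
-- ===== SOURCE B (Python) =====
-- def _clamp(v):
--     return max(-127, min(127, v))
--
-- def _iter_segmented_moves(dx, dy):
--     dx = int(dx)
--     dy = int(dy)
--     while True:
--         cx = _clamp(dx)
--         cy = _clamp(dy)
--         yield (cx, cy)
--         dx -= cx
--         dy -= cy
--         if dx == 0 and dy == 0:
--             break
-- ===== Notes on version B (the rewrite author's own statement) =====
-- stated objective: simpler
-- what changed: Replaces the two per-axis chunk lists plus index-based zip-with-zero-padding by one simultaneous do-while loop that clamps and subtracts both running deltas at once.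
import Mathlib
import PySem

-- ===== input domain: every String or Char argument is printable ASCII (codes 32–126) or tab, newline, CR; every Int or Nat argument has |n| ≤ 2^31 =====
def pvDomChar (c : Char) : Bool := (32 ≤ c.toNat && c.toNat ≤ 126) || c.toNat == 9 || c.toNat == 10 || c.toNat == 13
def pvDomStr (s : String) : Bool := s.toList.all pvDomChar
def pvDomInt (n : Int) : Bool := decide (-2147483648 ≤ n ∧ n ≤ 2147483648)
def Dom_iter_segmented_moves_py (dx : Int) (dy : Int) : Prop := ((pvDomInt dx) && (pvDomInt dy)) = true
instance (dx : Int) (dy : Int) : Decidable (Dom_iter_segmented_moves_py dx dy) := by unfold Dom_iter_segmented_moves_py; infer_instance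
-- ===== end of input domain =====

-- B replaces A's two per-axis chunk lists plus index-based zip-with-zero-padding by one
-- simultaneous clamp-and-subtract loop over the two running deltas (simpler decomposition).
-- (The `fuel` parameters below only make the Python while-loops total; fuel is provably sufficient.)

-- ===== PORT A =====
-- while remaining > 127: chunks.append(127); remaining -= 127
def pvLoopPos (fuel : Nat) (remaining : Int) (chunks : List Int) : Int × List Int :=
  match fuel with
  | 0 => (remaining, chunks)
  | f + 1 =>
    if remaining > 127 then pvLoopPos f (remaining - 127) (chunks ++ [127]) else (remaining, chunks)

-- while remaining < -127: chunks.append(-127); remaining += 127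
def pvLoopNeg (fuel : Nat) (remaining : Int) (chunks : List Int) : Int × List Int :=
  match fuel with
  | 0 => (remaining, chunks)
  | f + 1 =>
    if remaining < -127 then pvLoopNeg f (remaining + 127) (chunks ++ [-127]) else (remaining, chunks)

-- _split_axis: both while loops, then chunks.append(remaining)
def pvSplitAxis (delta : Int) : List Int :=
  let p := pvLoopPos delta.toNat delta []
  let q := pvLoopNeg (-p.1).toNat p.1 p.2
  q.2 ++ [q.1]

-- the generator's for-loop over range(chunk_count) with guarded indexing
def iter_segmented_moves_py (dx : Int) (dy : Int) : List (Int × Int) :=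
  let xc := pvSplitAxis dx
  let yc := pvSplitAxis dy
  let n := max xc.length yc.length
  (List.range n).map (fun i =>
    ((if i < xc.length then xc.getD i 0 else 0),
     (if i < yc.length then yc.getD i 0 else 0)))

-- ===== PORT B =====
-- _clamp(v) = max(-127, min(127, v))
def pvClamp (v : Int) : Int := max (-127) (min 127 v)

-- the do-while loop: emit the clamped pair, subtract, stop when both deltas are zero
def pvAltGo (fuel : Nat) (dx dy : Int) : List (Int × Int) :=
  match fuel with
  | 0 => []
  | f + 1 =>
    (pvClamp dx, pvClamp dy) ::
      (if dx - pvClamp dx = 0 ∧ dy - pvClamp dy = 0 then []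
       else pvAltGo f (dx - pvClamp dx) (dy - pvClamp dy))

def iter_segmented_moves_py_alt (dx : Int) (dy : Int) : List (Int × Int) :=
  pvAltGo (dx.natAbs + dy.natAbs + 1) dx dy

-- ===== PRECONDITION & SPEC =====
def Spec_iter_segmented_moves_py (dx : Int) (dy : Int) (out : List (Int × Int)) : Prop := out = iter_segmented_moves_py_alt dx dy
instance (dx : Int) (dy : Int) (out : List (Int × Int)) : Decidable (Spec_iter_segmented_moves_py dx dy out) := by unfold Spec_iter_segmented_moves_py; infer_instance

-- ===== CLAIM (what is proved, stated in full; the proofs are below) =====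
def Claim_equal_iter_segmented_moves_py : Prop := ∀ (dx : Int) (dy : Int), Dom_iter_segmented_moves_py dx dy → Spec_iter_segmented_moves_py dx dy (iter_segmented_moves_py dx dy)

-- ===== LEMMAS AND PROOFS =====

-- the zip-with-zero-padding shape of A's final loop, as a standalone function
def pvZp (xs ys : List Int) : List (Int × Int) :=
  (List.range (max xs.length ys.length)).map (fun i =>
    ((if i < xs.length then xs.getD i 0 else 0),
     (if i < ys.length then ys.getD i 0 else 0)))

lemma pvA_eq_zp (dx dy : Int) :
    iter_segmented_moves_py dx dy = pvZp (pvSplitAxis dx) (pvSplitAxis dy) := rfl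

-- when the loop guard is false the loop returns immediately, any fuel
lemma pvLoopPos_stop (f : Nat) (r : Int) (c : List Int) (h : ¬ r > 127) :
    pvLoopPos f r c = (r, c) := by
  cases f <;> simp [pvLoopPos, h]

lemma pvLoopNeg_stop (f : Nat) (r : Int) (c : List Int) (h : ¬ r < -127) :
    pvLoopNeg f r c = (r, c) := by
  cases f <;> simp [pvLoopNeg, h]

lemma pvLoopPos_step (f : Nat) (r : Int) (c : List Int) (h : r > 127) :
    pvLoopPos (f + 1) r c = pvLoopPos f (r - 127) (c ++ [127]) := by
  simp [pvLoopPos, h]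

lemma pvLoopNeg_step (f : Nat) (r : Int) (c : List Int) (h : r < -127) :
    pvLoopNeg (f + 1) r c = pvLoopNeg f (r + 127) (c ++ [-127]) := by
  simp [pvLoopNeg, h]

-- any fuel ≥ r.toNat computes the same result (each iteration drops r.toNat by 127 ≥ 1)
lemma pvLoopPos_fuel : ∀ (f g : Nat) (r : Int) (c : List Int), r.toNat ≤ f → r.toNat ≤ g →
    pvLoopPos f r c = pvLoopPos g r c := by
  intro f
  induction f with
  | zero =>
    intro g r c hf _
    rw [pvLoopPos_stop 0 r c (by omega), pvLoopPos_stop g r c (by omega)]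
  | succ f ih =>
    intro g r c hf hg
    by_cases hr : r > 127
    · cases g with
      | zero => omega
      | succ g =>
        show pvLoopPos (f + 1) r c = pvLoopPos (g + 1) r c
        unfold pvLoopPos
        rw [if_pos hr, if_pos hr]
        exact ih g (r - 127) (c ++ [127]) (by omega) (by omega)
    · rw [pvLoopPos_stop _ r c hr, pvLoopPos_stop g r c hr]

lemma pvLoopNeg_fuel : ∀ (f g : Nat) (r : Int) (c : List Int), (-r).toNat ≤ f → (-r).toNat ≤ g →
    pvLoopNeg f r c = pvLoopNeg g r c := by
  intro f
  induction f with
  | zero =>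
    intro g r c hf _
    rw [pvLoopNeg_stop 0 r c (by omega), pvLoopNeg_stop g r c (by omega)]
  | succ f ih =>
    intro g r c hf hg
    by_cases hr : r < -127
    · cases g with
      | zero => omega
      | succ g =>
        show pvLoopNeg (f + 1) r c = pvLoopNeg (g + 1) r c
        unfold pvLoopNeg
        rw [if_pos hr, if_pos hr]
        exact ih g (r + 127) (c ++ [-127]) (by omega) (by omega)
    · rw [pvLoopNeg_stop _ r c hr, pvLoopNeg_stop g r c hr]

-- the accumulator only prefixes the produced chunks
lemma pvLoopPos_acc : ∀ (f : Nat) (r : Int) (c : List Int),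
    pvLoopPos f r c = ((pvLoopPos f r []).1, c ++ (pvLoopPos f r []).2) := by
  intro f
  induction f with
  | zero => intro r c; simp [pvLoopPos]
  | succ f ih =>
    intro r c
    by_cases hr : r > 127
    · rw [pvLoopPos_step f r c hr, pvLoopPos_step f r [] hr, ih (r - 127) (c ++ [127])]
      simp only [List.nil_append]
      rw [ih (r - 127) [127]]
      simp
    · rw [pvLoopPos_stop _ r c hr, pvLoopPos_stop _ r [] hr]
      simp

lemma pvLoopNeg_acc : ∀ (f : Nat) (r : Int) (c : List Int),
    pvLoopNeg f r c = ((pvLoopNeg f r []).1, c ++ (pvLoopNeg f r []).2) := by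
  intro f
  induction f with
  | zero => intro r c; simp [pvLoopNeg]
  | succ f ih =>
    intro r c
    by_cases hr : r < -127
    · rw [pvLoopNeg_step f r c hr, pvLoopNeg_step f r [] hr, ih (r + 127) (c ++ [-127])]
      simp only [List.nil_append]
      rw [ih (r + 127) [-127]]
      simp
    · rw [pvLoopNeg_stop _ r c hr, pvLoopNeg_stop _ r [] hr]
      simp

lemma pvSplit_mid (d : Int) (h1 : -127 ≤ d) (h2 : d ≤ 127) : pvSplitAxis d = [d] := by
  have hp : pvLoopPos d.toNat d [] = (d, []) := pvLoopPos_stop _ d [] (by omega)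
  simp only [pvSplitAxis, hp]
  rw [pvLoopNeg_stop _ d [] (by omega)]
  simp

lemma pvSplit_gt (d : Int) (h : 127 < d) : pvSplitAxis d = 127 :: pvSplitAxis (d - 127) := by
  obtain ⟨f, hf⟩ : ∃ f, d.toNat = f + 1 := ⟨d.toNat - 1, by omega⟩
  have hp : pvLoopPos d.toNat d [] =
      ((pvLoopPos (d - 127).toNat (d - 127) []).1, [127] ++ (pvLoopPos (d - 127).toNat (d - 127) []).2) := by
    rw [hf, pvLoopPos_step f d [] h,
      pvLoopPos_fuel f (d - 127).toNat (d - 127) ([] ++ [127]) (by omega) le_rfl]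
    simpa using pvLoopPos_acc (d - 127).toNat (d - 127) [127]
  simp only [pvSplitAxis, hp]
  rw [pvLoopNeg_acc _ (pvLoopPos (d - 127).toNat (d - 127) []).1 ([127] ++ (pvLoopPos (d - 127).toNat (d - 127) []).2),
      pvLoopNeg_acc _ (pvLoopPos (d - 127).toNat (d - 127) []).1 (pvLoopPos (d - 127).toNat (d - 127) []).2]
  simp

lemma pvSplit_lt (d : Int) (h : d < -127) : pvSplitAxis d = -127 :: pvSplitAxis (d + 127) := by
  have hp : pvLoopPos d.toNat d [] = (d, []) := pvLoopPos_stop _ d [] (by omega)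
  have hp2 : pvLoopPos (d + 127).toNat (d + 127) [] = (d + 127, []) :=
    pvLoopPos_stop _ (d + 127) [] (by omega)
  obtain ⟨f, hf⟩ : ∃ f, (-d).toNat = f + 1 := ⟨(-d).toNat - 1, by omega⟩
  have hq : pvLoopNeg (-d).toNat d [] =
      ((pvLoopNeg (-(d + 127)).toNat (d + 127) []).1, [-127] ++ (pvLoopNeg (-(d + 127)).toNat (d + 127) []).2) := by
    rw [hf, pvLoopNeg_step f d [] h,
      pvLoopNeg_fuel f (-(d + 127)).toNat (d + 127) ([] ++ [-127]) (by omega) le_rfl]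
    simpa using pvLoopNeg_acc (-(d + 127)).toNat (d + 127) [-127]
  simp [pvSplitAxis, hp, hp2, hq]

lemma pvSplit_unfold (d : Int) :
    pvSplitAxis d = pvClamp d ::
      (if d - pvClamp d = 0 then [] else pvSplitAxis (d - pvClamp d)) := by
  by_cases h1 : 127 < d
  · have hc : pvClamp d = 127 := by unfold pvClamp; omega
    rw [hc, if_neg (by omega), pvSplit_gt d h1]
  · by_cases h2 : d < -127
    · have hc : pvClamp d = -127 := by unfold pvClamp; omega
      rw [hc, if_neg (by omega), pvSplit_lt d h2]
      norm_num
    · have hc : pvClamp d = d := by unfold pvClamp; omega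
      rw [hc, if_pos (by omega), pvSplit_mid d (by omega) (by omega)]

lemma pvSplit_ne_nil (d : Int) : pvSplitAxis d ≠ [] := by
  simp [pvSplitAxis]

lemma pvZp_cons_cons (x y : Int) (xs ys : List Int) :
    pvZp (x :: xs) (y :: ys) = (x, y) :: pvZp xs ys := by
  simp only [pvZp, List.length_cons, Nat.succ_max_succ, List.range_succ_eq_map,
    List.map_cons, List.map_map]
  congr 1
  apply List.map_congr_left
  intro i _
  simp

lemma pvZp_nil_left (ys : List Int) (h : ys ≠ []) : pvZp [] ys = pvZp [0] ys := by
  obtain ⟨y, ys, rfl⟩ := List.exists_cons_of_ne_nil h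
  simp only [pvZp, List.length_nil, List.length_cons]
  have hm : max 0 (ys.length + 1) = max 1 (ys.length + 1) := by omega
  rw [hm]
  apply List.map_congr_left
  intro i hi
  simp only [List.mem_range] at hi
  rcases i with _ | i <;> simp

lemma pvZp_nil_right (xs : List Int) (h : xs ≠ []) : pvZp xs [] = pvZp xs [0] := by
  obtain ⟨x, xs, rfl⟩ := List.exists_cons_of_ne_nil h
  simp only [pvZp, List.length_nil, List.length_cons]
  have hm : max (xs.length + 1) 0 = max (xs.length + 1) 1 := by omega
  rw [hm]
  apply List.map_congr_left
  intro i hi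
  simp only [List.mem_range] at hi
  rcases i with _ | i <;> simp

-- the heart of the equivalence: A's padded zip of the two chunk lists is B's simultaneous loop,
-- for any sufficient fuel
lemma pvMain_aux : ∀ (f : Nat) (dx dy : Int), dx.natAbs + dy.natAbs < f →
    pvZp (pvSplitAxis dx) (pvSplitAxis dy) = pvAltGo f dx dy := by
  intro f
  induction f with
  | zero => intro dx dy hn; omega
  | succ f ih =>
    intro dx dy hn
    have hx : dx - pvClamp dx ≠ 0 → (dx - pvClamp dx).natAbs < dx.natAbs := by
      intro h; unfold pvClamp at *; omega
    have hy : dy - pvClamp dy ≠ 0 → (dy - pvClamp dy).natAbs < dy.natAbs := by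
      intro h; unfold pvClamp at *; omega
    rw [pvSplit_unfold dx, pvSplit_unfold dy]
    show _ = pvAltGo (f + 1) dx dy
    unfold pvAltGo
    by_cases h1 : dx - pvClamp dx = 0 <;> by_cases h2 : dy - pvClamp dy = 0
    · rw [if_pos h1, if_pos h2, if_pos ⟨h1, h2⟩, pvZp_cons_cons]
      simp [pvZp]
    · rw [if_pos h1, if_neg h2, if_neg (by tauto), pvZp_cons_cons,
          pvZp_nil_left _ (pvSplit_ne_nil _), ← pvSplit_mid 0 (by omega) (by omega), h1]
      have := hy h2
      exact congrArg _ (ih 0 (dy - pvClamp dy) (by simp; omega))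
    · rw [if_neg h1, if_pos h2, if_neg (by tauto), pvZp_cons_cons,
          pvZp_nil_right _ (pvSplit_ne_nil _), ← pvSplit_mid 0 (by omega) (by omega), h2]
      have := hx h1
      exact congrArg _ (ih (dx - pvClamp dx) 0 (by simp; omega))
    · rw [if_neg h1, if_neg h2, if_neg (by tauto), pvZp_cons_cons]
      have := hx h1
      have := hy h2
      exact congrArg _ (ih (dx - pvClamp dx) (dy - pvClamp dy) (by omega))

-- ===== VERDICT (by name: the statement is the Claim_ definition above) =====
theorem iter_segmented_moves_py_spec : Claim_equal_iter_segmented_moves_py := by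
  intro dx dy _
  unfold Spec_iter_segmented_moves_py iter_segmented_moves_py_alt
  rw [pvA_eq_zp]
  exact pvMain_aux (dx.natAbs + dy.natAbs + 1) dx dy (by omega)
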